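-- pv_equiv track=rewrite | github.com/RishiKumar156/python | wrongball.py | countWrongPlacedBalls
-- ===== SOURCE A (Python) =====
-- def countWrongPlacedBalls(s):
--     # code here
--     c = 0
--     for i in range(len(s)):
--         if s[i] == 'R' and i % 2 != 0:
--             c += 1
--         elif s[i] == 'B' and i % 2 == 0:
--             c += 1
--     return c
-- ===== SOURCE B (Python) =====
-- def countWrongPlacedBalls(s):
--     even, odd = s[::2], s[1::2]
--     return even.count('B') + odd.count('R')
-- ===== Notes on version B (the rewrite author's own statement) =====
-- stated objective: idiomatic
-- what changed: Replaces the indexed per-character parity loop with two parity slices (s[::2], s[1::2]), each scanned once by str.count for the one misplaced colour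
import Mathlib
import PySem

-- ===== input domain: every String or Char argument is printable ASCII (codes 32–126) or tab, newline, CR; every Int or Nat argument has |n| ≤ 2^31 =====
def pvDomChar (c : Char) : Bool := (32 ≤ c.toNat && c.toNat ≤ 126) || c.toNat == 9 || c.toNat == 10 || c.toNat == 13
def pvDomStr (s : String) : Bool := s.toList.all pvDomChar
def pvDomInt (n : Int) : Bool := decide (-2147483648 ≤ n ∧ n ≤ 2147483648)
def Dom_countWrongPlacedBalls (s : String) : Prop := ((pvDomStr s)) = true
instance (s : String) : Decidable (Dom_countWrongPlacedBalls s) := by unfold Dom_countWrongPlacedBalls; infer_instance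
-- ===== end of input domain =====

-- B replaces A's indexed per-character parity loop by two parity slices (s[::2], s[1::2]) each scanned once with str.count (idiomatic, same cost).

-- ===== PORT A =====
-- loop 'for i in range(len(s))' with the two elif branches; s[i] via pyGetD (i is always in range)
def countWrongPlacedBalls (s : String) : Int :=
  (PySem.List.pyRange 0 (PySem.Str.len s) 1).foldl
    (fun c i =>
      if PySem.List.pyGetD s.toList i ' ' = 'R' ∧ PySem.Int.mod i 2 ≠ 0 then c + 1
      else if PySem.List.pyGetD s.toList i ' ' = 'B' ∧ PySem.Int.mod i 2 = 0 then c + 1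
      else c) 0

-- ===== PORT B =====
-- even, odd = s[::2], s[1::2]; slice? is always 'some' for step 2, so the getD "" default is never taken
def countWrongPlacedBalls_alt (s : String) : Int :=
  let even := (PySem.Str.slice? s none none 2).getD ""
  let odd := (PySem.Str.slice? s (some 1) none 2).getD ""
  ((PySem.Str.count even "B" : Int)) + ((PySem.Str.count odd "R" : Int))

-- ===== PRECONDITION & SPEC =====
def Spec_countWrongPlacedBalls (s : String) (out : Int) : Prop := out = countWrongPlacedBalls_alt s
instance (s : String) (out : Int) : Decidable (Spec_countWrongPlacedBalls s out) := by unfold Spec_countWrongPlacedBalls; infer_instance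

-- ===== CLAIM (what is proved, stated in full; the proofs are below) =====
def Claim_equal_countWrongPlacedBalls : Prop := ∀ (s : String), Dom_countWrongPlacedBalls s → Spec_countWrongPlacedBalls s (countWrongPlacedBalls s)

-- ===== LEMMAS AND PROOFS =====

-- the even-index sublist of a list
def pvEvens : List Char → List Char
  | [] => []
  | [a] => [a]
  | a :: _ :: t => a :: pvEvens t

theorem pvEvens_cons (b : Char) (t : List Char) : pvEvens (b :: t) = b :: pvEvens t.tail := by
  cases t <;> rfl

-- str.count with a one-character needle is List.count
theorem pvCountGo_singleton (c : Char) :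
    ∀ (l : List Char) (fuel acc : Nat), l.length ≤ fuel →
      PySem.Chars.count.go [c] fuel l acc = acc + l.count c := by
  intro l
  induction l with
  | nil => intro fuel acc _; cases fuel <;> simp [PySem.Chars.count.go]
  | cons h t ih =>
      intro fuel acc hf
      cases fuel with
      | zero => simp at hf
      | succ f =>
          have ht : t.length ≤ f := by simpa using hf
          rw [PySem.Chars.count.go]
          by_cases hc : c = h
          · subst hc
            simp [List.isPrefixOf, ih f (acc + 1) ht]
            omega
          · simp [List.isPrefixOf, hc, ih f acc ht, Ne.symm hc]

theorem pvCount_singleton (l : List Char) (c : Char) :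
    PySem.Chars.count l [c] = l.count c := by
  simp [PySem.Chars.count, pvCountGo_singleton c l l.length 0 le_rfl]

-- [::2] picks the even-index sublist
theorem pvFilterMap_two (t : List Char) :
    (List.range ((t.length + 1) / 2)).filterMap (fun k => t[2 * k]?) = pvEvens t := by
  induction t using pvEvens.induct with
  | case1 => simp [pvEvens]
  | case2 a => simp [pvEvens, List.range_succ]
  | case3 a b t ih =>
      have hlen : ((a :: b :: t).length + 1) / 2 = (t.length + 1) / 2 + 1 := by
        simp; omega
      rw [hlen, List.range_succ_eq_map]
      simp only [List.filterMap_cons, List.filterMap_map]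
      have : ((fun k => (a :: b :: t)[2 * k]?) ∘ fun i => i + 1) = fun k => t[2 * k]? := by
        funext k
        have : 2 * (k + 1) = (2 * k) + 1 + 1 := by omega
        simp [Function.comp, this]
      rw [this]
      simpa [pvEvens] using ih

theorem pvSliceEven (l : List Char) :
    PySem.List.slice? l none none 2 = some (pvEvens l) := by
  have h1 : PySem.List.sliceIndices l.length none none 2 = (0, (l.length : Int), 2) := by
    simp [PySem.List.sliceIndices]
  simp only [PySem.List.slice?, h1]
  norm_num
  have hc : (if 0 < l.length then (((l.length : Int) + 2 - 1) / 2).toNat else 0) = (l.length + 1) / 2 := by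
    split_ifs <;> omega
  rw [hc]
  have hfun : (fun k : Nat => l[(2 * (k : Int)).toNat]?) = fun k => l[2 * k]? := by
    funext k
    have : ((2 : Int) * (k : Int)).toNat = 2 * k := by omega
    rw [this]
  rw [hfun, pvFilterMap_two]

theorem pvSliceOdd (l : List Char) :
    PySem.List.slice? l (some 1) none 2 = some (pvEvens l.tail) := by
  cases l with
  | nil => rfl
  | cons a t =>
      have h1 : PySem.List.sliceIndices (a :: t).length (some 1) none 2
          = (1, ((a :: t).length : Int), 2) := by
        simp [PySem.List.sliceIndices]
      simp only [PySem.List.slice?, h1]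
      norm_num
      have hc : (if 0 < t.length then (((t.length : Int) + 2 - 1) / 2).toNat else 0) = (t.length + 1) / 2 := by
        split_ifs <;> omega
      rw [hc]
      have hfun : (fun k : Nat => (a :: t)[((1 : Int) + 2 * (k : Int)).toNat]?)
          = fun k => t[2 * k]? := by
        funext k
        have : ((1 : Int) + 2 * (k : Int)).toNat = 2 * k + 1 := by omega
        simp [this]
      rw [hfun]
      simp [pvFilterMap_two]

-- A's count over range(len(s)) split by index parity
theorem pvCountP_parity (l : List Char) :
    (List.range l.length).countP
        (fun k => decide ((l.getD k ' ' = 'R' ∧ k % 2 = 1) ∨ (l.getD k ' ' = 'B' ∧ k % 2 = 0)))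
      = (pvEvens l).count 'B' + (pvEvens l.tail).count 'R' := by
  induction l using pvEvens.induct with
  | case1 => simp [pvEvens]
  | case2 a =>
      by_cases ha : a = 'B' <;>
        simp [pvEvens, List.range_succ, ha]
  | case3 a b t ih =>
      have h2 : (a :: b :: t).length = t.length + 1 + 1 := by simp
      rw [h2, List.range_succ_eq_map, List.range_succ_eq_map]
      simp only [List.countP_cons, List.countP_map]
      have hfun : (((fun k => decide (((a :: b :: t).getD k ' ' = 'R' ∧ k % 2 = 1) ∨
            ((a :: b :: t).getD k ' ' = 'B' ∧ k % 2 = 0))) ∘ Nat.succ) ∘ Nat.succ)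
          = fun k => decide ((t.getD k ' ' = 'R' ∧ k % 2 = 1) ∨ (t.getD k ' ' = 'B' ∧ k % 2 = 0)) := by
        funext k
        have e1 : (k + 1 + 1) % 2 = k % 2 := by omega
        simp [Function.comp, Nat.succ_eq_add_one, e1]
      rw [hfun, ih]
      simp only [Function.comp_apply, Nat.succ_eq_add_one, List.getD_cons_succ,
        List.getD_cons_zero, List.tail_cons, pvEvens_cons, List.count_cons]
      by_cases ha : a = 'B' <;> by_cases hb : b = 'R' <;>
        simp [ha, hb] <;> omega

-- ===== VERDICT (by name: the statement is the Claim_ definition above) =====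
theorem countWrongPlacedBalls_spec : Claim_equal_countWrongPlacedBalls := by
  intro s _
  unfold Spec_countWrongPlacedBalls countWrongPlacedBalls countWrongPlacedBalls_alt
  -- B side: the two slices are pvEvens of the list and of its tail
  have hB1 : PySem.Str.slice? s none none 2 = some (String.ofList (pvEvens s.toList)) := by
    simp [PySem.Str.slice?, PySem.Chars.slice?_eq_listSlice?, pvSliceEven]
  have hB2 : PySem.Str.slice? s (some 1) none 2 = some (String.ofList (pvEvens s.toList.tail)) := by
    simp [PySem.Str.slice?, PySem.Chars.slice?_eq_listSlice?, pvSliceOdd]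
  rw [hB1, hB2]
  simp only [Option.getD_some, PySem.Str.count_eq]
  rw [show ("B" : String).toList = ['B'] from rfl, show ("R" : String).toList = ['R'] from rfl]
  simp only [String.toList_ofList, pvCount_singleton]
  -- A side: rewrite the range and the loop body, then count
  have hlen : PySem.Str.len s = (s.toList.length : Int) := by
    simp [PySem.Str.len_eq]
  rw [hlen, PySem.List.pyRange_zero_natCast, List.foldl_map]
  have hbody : (fun (c : Int) (k : Nat) =>
        if PySem.List.pyGetD s.toList (k : Int) ' ' = 'R' ∧ PySem.Int.mod (k : Int) 2 ≠ 0 then c + 1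
        else if PySem.List.pyGetD s.toList (k : Int) ' ' = 'B' ∧ PySem.Int.mod (k : Int) 2 = 0 then c + 1
        else c)
      = fun c k => if (s.toList.getD k ' ' = 'R' ∧ k % 2 = 1) ∨ (s.toList.getD k ' ' = 'B' ∧ k % 2 = 0)
          then c + 1 else c := by
    funext c k
    have hm : PySem.Int.mod (k : Int) 2 = ((k % 2 : Nat) : Int) := by
      exact_mod_cast PySem.Int.mod_natCast k 2
    rw [hm]
    have h1 : (((k % 2 : Nat) : Int) ≠ 0) ↔ k % 2 = 1 := by omega
    have h2 : (((k % 2 : Nat) : Int) = 0) ↔ k % 2 = 0 := by omega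
    simp only [PySem.List.pyGetD_natCast, h1, h2]
    split_ifs with hx hy hz <;> tauto
  rw [hbody, PySem.List.foldl_ite_add_one, pvCountP_parity]
  push_cast
  ring
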